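-- pv_equiv track=rewrite | github.com/tosurajitc/watsonx-ipg-testing | src/phase2/uft_code_generator/automation_analyzer.py | _generate_libraries_list
-- ===== SOURCE A (Python) =====
-- from typing import Dict, List, Any, Tuple, Optional, Set
--
-- def _generate_libraries_list(step_analyses: List[Dict[str, Any]]) -> List[str]:
--     """
--     Generate list of recommended UFT libraries and add-ins.
--
--     Args:
--         step_analyses (List[Dict[str, Any]]): Step analyses
--
--     Returns:
--         List[str]: Recommended libraries and add-ins
--     """
--     libraries = []
--
--     # Collect all identified objects
--     all_objects = []
--     for step in step_analyses:
--         all_objects.extend(step.get('identified_objects', []))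
--
--     # Recommend Web Add-in if any web objects
--     if any(obj.startswith('Web') for obj in all_objects):
--         libraries.append("<strong>Web Add-in:</strong> For web browser automation capabilities")
--
--     # Recommend Windows Add-in if any Windows objects
--     if any(obj.startswith('Win') for obj in all_objects):
--         libraries.append("<strong>ActiveX Add-in:</strong> For desktop application components if necessary")
--
--     # Always recommend Web Extensions for modern web apps
--     libraries.append("<strong>Web Extensions:</strong> For enhanced HTML object recognition")
--
--     # Add additional libraries based on specific challenges
--     all_challenges = []
--     for step in step_analyses:
--         all_challenges.extend(step.get('challenges', []))
--
--     if any('image' in challenge.lower() for challenge in all_challenges):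
--         libraries.append("<strong>Image Checkpoint Extension:</strong> For visual comparison operations")
--
--     if any('data' in challenge.lower() for challenge in all_challenges):
--         libraries.append("<strong>Excel Add-in:</strong> For data-driven testing capabilities")
--
--     return libraries
-- ===== SOURCE B (Python) =====
-- def _generate_libraries_list(step_analyses):
--     """Single pass over step_analyses maintaining four booleans instead of
--     building intermediate all_objects/all_challenges lists."""
--     has_web = has_win = has_image = has_data = False
--     for step in step_analyses:
--         for obj in step.get('identified_objects', []):
--             has_web = has_web or obj.startswith('Web')
--             has_win = has_win or obj.startswith('Win')
--         for challenge in step.get('challenges', []):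
--             cl = challenge.lower()
--             has_image = has_image or 'image' in cl
--             has_data = has_data or 'data' in cl
--     libraries = []
--     if has_web:
--         libraries.append("<strong>Web Add-in:</strong> For web browser automation capabilities")
--     if has_win:
--         libraries.append("<strong>ActiveX Add-in:</strong> For desktop application components if necessary")
--     libraries.append("<strong>Web Extensions:</strong> For enhanced HTML object recognition")
--     if has_image:
--         libraries.append("<strong>Image Checkpoint Extension:</strong> For visual comparison operations")
--     if has_data:
--         libraries.append("<strong>Excel Add-in:</strong> For data-driven testing capabilities")
--     return libraries
-- ===== Notes on version B (the rewrite author's own statement) =====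
-- stated objective: simpler
-- what changed: One pass over step_analyses maintaining four booleans replaces building the intermediate all_objects and all_challenges lists that A then rescans with any().
import Mathlib
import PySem

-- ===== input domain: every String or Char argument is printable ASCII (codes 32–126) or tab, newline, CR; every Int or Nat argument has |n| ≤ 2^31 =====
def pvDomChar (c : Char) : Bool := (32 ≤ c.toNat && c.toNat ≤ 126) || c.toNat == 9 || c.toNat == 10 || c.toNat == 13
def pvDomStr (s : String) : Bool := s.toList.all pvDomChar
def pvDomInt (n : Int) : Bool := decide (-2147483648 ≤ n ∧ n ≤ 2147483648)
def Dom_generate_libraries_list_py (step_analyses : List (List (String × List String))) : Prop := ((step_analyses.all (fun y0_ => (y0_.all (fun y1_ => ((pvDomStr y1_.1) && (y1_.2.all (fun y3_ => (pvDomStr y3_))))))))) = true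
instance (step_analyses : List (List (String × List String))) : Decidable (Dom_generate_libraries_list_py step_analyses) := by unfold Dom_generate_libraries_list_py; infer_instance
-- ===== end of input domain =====

-- B replaces A's intermediate all_objects/all_challenges lists (each rescanned by any())
-- with a single pass over step_analyses maintaining four booleans; objective: simpler.


-- ===== PORT A =====
def generate_libraries_list_py (step_analyses : List (List (String × List String))) : List String :=
  let libraries : List String := []
  -- all_objects.extend(step.get('identified_objects', []))
  let all_objects : List String :=
    step_analyses.foldl (fun acc step => acc ++ PySem.Dict.getD ⟨step⟩ "identified_objects" []) []
  let libraries := if all_objects.any (fun obj => PySem.Str.startswith obj "Web") then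
      libraries ++ ["<strong>Web Add-in:</strong> For web browser automation capabilities"]
    else libraries
  let libraries := if all_objects.any (fun obj => PySem.Str.startswith obj "Win") then
      libraries ++ ["<strong>ActiveX Add-in:</strong> For desktop application components if necessary"]
    else libraries
  let libraries := libraries ++ ["<strong>Web Extensions:</strong> For enhanced HTML object recognition"]
  let all_challenges : List String :=
    step_analyses.foldl (fun acc step => acc ++ PySem.Dict.getD ⟨step⟩ "challenges" []) []
  let libraries := if all_challenges.any (fun c => PySem.Str.isIn "image" (PySem.Str.lower c)) then
      libraries ++ ["<strong>Image Checkpoint Extension:</strong> For visual comparison operations"]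
    else libraries
  let libraries := if all_challenges.any (fun c => PySem.Str.isIn "data" (PySem.Str.lower c)) then
      libraries ++ ["<strong>Excel Add-in:</strong> For data-driven testing capabilities"]
    else libraries
  libraries

-- ===== PORT B =====
-- one pass over step_analyses maintaining (has_web, has_win, has_image, has_data)
def generate_libraries_list_py_alt (step_analyses : List (List (String × List String))) : List String :=
  let flags :=
    step_analyses.foldl (fun (f : Bool × Bool × Bool × Bool) step =>
      let ow := (PySem.Dict.getD ⟨step⟩ "identified_objects" ([] : List String)).foldl
        (fun (p : Bool × Bool) obj =>
          (p.1 || PySem.Str.startswith obj "Web", p.2 || PySem.Str.startswith obj "Win"))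
        (f.1, f.2.1)
      let id := (PySem.Dict.getD ⟨step⟩ "challenges" ([] : List String)).foldl
        (fun (p : Bool × Bool) challenge =>
          let cl := PySem.Str.lower challenge
          (p.1 || PySem.Str.isIn "image" cl, p.2 || PySem.Str.isIn "data" cl))
        (f.2.2.1, f.2.2.2)
      (ow.1, ow.2, id.1, id.2))
      (false, false, false, false)
  (if flags.1 then ["<strong>Web Add-in:</strong> For web browser automation capabilities"] else []) ++
  (if flags.2.1 then ["<strong>ActiveX Add-in:</strong> For desktop application components if necessary"] else []) ++
  ["<strong>Web Extensions:</strong> For enhanced HTML object recognition"] ++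
  (if flags.2.2.1 then ["<strong>Image Checkpoint Extension:</strong> For visual comparison operations"] else []) ++
  (if flags.2.2.2 then ["<strong>Excel Add-in:</strong> For data-driven testing capabilities"] else [])

-- ===== PRECONDITION & SPEC =====
def Spec_generate_libraries_list_py (step_analyses : List (List (String × List String))) (out : List String) : Prop := out = generate_libraries_list_py_alt step_analyses
instance (step_analyses : List (List (String × List String))) (out : List String) : Decidable (Spec_generate_libraries_list_py step_analyses out) := by unfold Spec_generate_libraries_list_py; infer_instance

-- ===== CLAIM (what is proved, stated in full; the proofs are below) =====
def Claim_equal_generate_libraries_list_py : Prop := ∀ (step_analyses : List (List (String × List String))), Dom_generate_libraries_list_py step_analyses → Spec_generate_libraries_list_py step_analyses (generate_libraries_list_py step_analyses)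

-- ===== LEMMAS AND PROOFS =====

-- folding two or-flags over a list computes the initial flags or-ed with `any`
theorem pv_fold_two_flags {α : Type} (p q : α → Bool) :
    ∀ (xs : List α) (s : Bool × Bool),
      xs.foldl (fun (s : Bool × Bool) x => (s.1 || p x, s.2 || q x)) s
        = (s.1 || xs.any p, s.2 || xs.any q) := by
  intro xs
  induction xs with
  | nil => simp
  | cons x xs ih => intro s; simp [List.foldl_cons, ih, Bool.or_assoc]

-- one step of B's outer fold
theorem pv_step (f : Bool × Bool × Bool × Bool) (st : List (String × List String)) :
    (let ow := (PySem.Dict.getD ⟨st⟩ "identified_objects" ([] : List String)).foldl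
        (fun (p : Bool × Bool) obj =>
          (p.1 || PySem.Str.startswith obj "Web", p.2 || PySem.Str.startswith obj "Win"))
        (f.1, f.2.1)
     let id := (PySem.Dict.getD ⟨st⟩ "challenges" ([] : List String)).foldl
        (fun (p : Bool × Bool) challenge =>
          let cl := PySem.Str.lower challenge
          (p.1 || PySem.Str.isIn "image" cl, p.2 || PySem.Str.isIn "data" cl))
        (f.2.2.1, f.2.2.2)
     ((ow.1, ow.2, id.1, id.2) : Bool × Bool × Bool × Bool))
    = (f.1 || (PySem.Dict.getD ⟨st⟩ "identified_objects" ([] : List String)).any (fun o => PySem.Str.startswith o "Web"),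
       f.2.1 || (PySem.Dict.getD ⟨st⟩ "identified_objects" ([] : List String)).any (fun o => PySem.Str.startswith o "Win"),
       f.2.2.1 || (PySem.Dict.getD ⟨st⟩ "challenges" ([] : List String)).any (fun c => PySem.Str.isIn "image" (PySem.Str.lower c)),
       f.2.2.2 || (PySem.Dict.getD ⟨st⟩ "challenges" ([] : List String)).any (fun c => PySem.Str.isIn "data" (PySem.Str.lower c))) := by
  simp only [pv_fold_two_flags]

-- B's outer fold computes the four `any`s over the per-step lists
theorem pv_fold_flags (sa : List (List (String × List String))) :
    ∀ (s : Bool × Bool × Bool × Bool),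
      sa.foldl (fun (f : Bool × Bool × Bool × Bool) step =>
        let ow := (PySem.Dict.getD ⟨step⟩ "identified_objects" ([] : List String)).foldl
          (fun (p : Bool × Bool) obj =>
            (p.1 || PySem.Str.startswith obj "Web", p.2 || PySem.Str.startswith obj "Win"))
          (f.1, f.2.1)
        let id := (PySem.Dict.getD ⟨step⟩ "challenges" ([] : List String)).foldl
          (fun (p : Bool × Bool) challenge =>
            let cl := PySem.Str.lower challenge
            (p.1 || PySem.Str.isIn "image" cl, p.2 || PySem.Str.isIn "data" cl))
          (f.2.2.1, f.2.2.2)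
        (ow.1, ow.2, id.1, id.2)) s
      = (s.1 || sa.any (fun s => (PySem.Dict.getD ⟨s⟩ "identified_objects" ([] : List String)).any (fun o => PySem.Str.startswith o "Web")),
         s.2.1 || sa.any (fun s => (PySem.Dict.getD ⟨s⟩ "identified_objects" ([] : List String)).any (fun o => PySem.Str.startswith o "Win")),
         s.2.2.1 || sa.any (fun s => (PySem.Dict.getD ⟨s⟩ "challenges" ([] : List String)).any (fun c => PySem.Str.isIn "image" (PySem.Str.lower c))),
         s.2.2.2 || sa.any (fun s => (PySem.Dict.getD ⟨s⟩ "challenges" ([] : List String)).any (fun c => PySem.Str.isIn "data" (PySem.Str.lower c)))) := by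
  induction sa with
  | nil => simp
  | cons st sa ih =>
    intro s
    rw [List.foldl_cons]
    rw [pv_step s st, ih]
    simp [Bool.or_assoc]

-- A's accumulated list, tested with `any`, is the `any` of the per-step `any`s
theorem pv_any_extend (sa : List (List (String × List String))) (key : String) (p : String → Bool) :
    (sa.foldl (fun acc step => acc ++ PySem.Dict.getD ⟨step⟩ key []) []).any p
      = sa.any (fun s => (PySem.Dict.getD ⟨s⟩ key ([] : List String)).any p) := by
  rw [PySem.List.foldl_append_eq_flatMap]
  simp

-- ===== VERDICT (by name: the statement is the Claim_ definition above) =====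
theorem generate_libraries_list_py_spec : Claim_equal_generate_libraries_list_py := by
  intro sa _
  show generate_libraries_list_py sa = generate_libraries_list_py_alt sa
  unfold generate_libraries_list_py generate_libraries_list_py_alt
  simp only [pv_fold_flags, pv_any_extend, Bool.false_or]
  cases sa.any (fun s => (PySem.Dict.getD ⟨s⟩ "identified_objects" ([] : List String)).any (fun o => PySem.Str.startswith o "Web")) <;>
  cases sa.any (fun s => (PySem.Dict.getD ⟨s⟩ "identified_objects" ([] : List String)).any (fun o => PySem.Str.startswith o "Win")) <;>
  cases sa.any (fun s => (PySem.Dict.getD ⟨s⟩ "challenges" ([] : List String)).any (fun c => PySem.Str.isIn "image" (PySem.Str.lower c))) <;>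
  cases sa.any (fun s => (PySem.Dict.getD ⟨s⟩ "challenges" ([] : List String)).any (fun c => PySem.Str.isIn "data" (PySem.Str.lower c))) <;>
  simp
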